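-- pv_equiv track=rewrite | github.com/difcortesgu/chocopy_analizer | gen/grammar/grammar_transformations.py | getNextFactors
-- ===== SOURCE A (Python) =====
-- def getNextFactors(rules):
--     factors = {}
--     for i, rule in enumerate(rules):
--         if rule[0] not in factors:
--             factors[rule[0]] = []
--         factors[rule[0]].append((i, rule[1:]))
--     factor = max(factors, key = lambda k: len(factors[k]))
--     if len(factors[factor]) > 1:
--         return factors[factor]
--     return None
-- ===== SOURCE B (Python) =====
-- def getNextFactors(rules):
--     counts = {}
--     for rule in rules:
--         counts[rule[0]] = counts.get(rule[0], 0) + 1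
--     best = max(counts, key=counts.get)
--     if counts[best] > 1:
--         return [(i, rule[1:]) for i, rule in enumerate(rules) if rule[0] == best]
--     return None
-- ===== Notes on version B (the rewrite author's own statement) =====
-- stated objective: simpler
-- what changed: A builds a dict mapping each first symbol to its full list of (index, tail) pairs and takes the max-size value; B only counts first symbols in one pass, picks the most frequent symbol, and reconstructs the single winning group with one filtering comprehension.
import Mathlib
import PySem

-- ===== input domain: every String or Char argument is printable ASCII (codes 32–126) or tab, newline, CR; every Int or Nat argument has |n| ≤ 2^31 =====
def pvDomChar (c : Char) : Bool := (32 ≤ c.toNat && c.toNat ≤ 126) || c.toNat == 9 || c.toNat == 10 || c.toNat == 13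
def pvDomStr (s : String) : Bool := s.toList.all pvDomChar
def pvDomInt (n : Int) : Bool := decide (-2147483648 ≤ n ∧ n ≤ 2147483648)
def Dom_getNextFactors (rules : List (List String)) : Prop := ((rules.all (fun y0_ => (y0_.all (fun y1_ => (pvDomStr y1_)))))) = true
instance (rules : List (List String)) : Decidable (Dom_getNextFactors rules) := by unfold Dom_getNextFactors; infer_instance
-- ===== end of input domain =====

-- B replaces A's dict-of-lists grouping by a count-then-filter two-pass scheme (same cost, plainer data).

-- ===== PORT A =====
-- rule[0] is ported as List.headD "" — exact under Pre_ (every rule is nonempty);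
-- rule[1:] is List.drop 1 (exact: a slice from 1 never raises).
def getNextFactors (rules : List (List String)) : Option (List (Int × List String)) :=
  let factors : PySem.Dict String (List (Int × List String)) :=
    (PySem.List.enumerate rules).foldl
      (fun d p =>
        let key := p.2.headD ""
        let d1 := if d.contains key then d else d.insert key []   -- if rule[0] not in factors: factors[rule[0]] = []
        d1.insert key (d1.getD key [] ++ [(p.1, p.2.drop 1)]))    -- factors[rule[0]].append((i, rule[1:]))
      PySem.Dict.empty
  match PySem.List.max? factors.keys (fun k => (factors.getD k []).length) with
  | none => none   -- Python raises ValueError here (rules = []); excluded by Pre_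
  | some factor =>
    if (factors.getD factor []).length > 1 then some (factors.getD factor []) else none

-- ===== PORT B =====
def getNextFactors_alt (rules : List (List String)) : Option (List (Int × List String)) :=
  let counts : PySem.Dict String Int :=
    rules.foldl (fun d r => d.insert (r.headD "") (d.getD (r.headD "") 0 + 1)) PySem.Dict.empty
  match PySem.List.max? counts.keys (fun k => counts.getD k 0) with
  | none => none   -- Python raises ValueError here (rules = []); excluded by Pre_
  | some best =>
    if counts.getD best 0 > 1 then
      some ((PySem.List.enumerate rules).foldl
        (fun acc p => if p.2.headD "" == best then acc ++ [(p.1, p.2.drop 1)] else acc) [])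
    else none

-- ===== PRECONDITION & SPEC =====
-- Pre_ excludes exactly the inputs on which Python A raises: the empty rule list
-- (ValueError from max over an empty dict) and any empty rule (IndexError from rule[0]).
def Pre_getNextFactors (rules : List (List String)) : Prop :=
  rules ≠ [] ∧ ∀ r ∈ rules, r ≠ []
instance (rules : List (List String)) : Decidable (Pre_getNextFactors rules) := by
  unfold Pre_getNextFactors; infer_instance
def pvWitness_getNextFactors : List (List String) := [["A", "b"], ["A", "c"], ["B"]]

def Spec_getNextFactors (rules : List (List String)) (out : Option (List (Int × List String))) : Prop := out = getNextFactors_alt rules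
instance (rules : List (List String)) (out : Option (List (Int × List String))) : Decidable (Spec_getNextFactors rules out) := by unfold Spec_getNextFactors; infer_instance

-- ===== CLAIM (what is proved, stated in full; the proofs are below) =====
def Claim_equal_getNextFactors : Prop := ∀ (rules : List (List String)), Dom_getNextFactors rules → Pre_getNextFactors rules → Spec_getNextFactors rules (getNextFactors rules)

-- ===== LEMMAS AND PROOFS =====

-- A's loop body (setdefault-to-[] then append) is exactly Dict.modify with default [].
lemma stepA_eq_modify (d : PySem.Dict String (List (Int × List String))) (key : String)
    (x : Int × List String) :
    (let d1 := if d.contains key then d else d.insert key []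
     d1.insert key (d1.getD key [] ++ [x])) = d.modify key [] (· ++ [x]) := by
  by_cases h : d.contains key
  · simp [h, PySem.Dict.modify]
  · simp only [h, Bool.false_eq_true, if_false, PySem.Dict.getD_insert_self,
      PySem.Dict.insert_insert_self]
    rw [PySem.Dict.modify, PySem.Dict.getD_of_not_contains d [] (by simpa using h)]

lemma enum_map_snd {α : Type} (xs : List α) (s : Int) :
    (PySem.List.enumerate xs s).map (·.2) = xs := by
  induction xs generalizing s with
  | nil => rfl
  | cons a t ih => simp [PySem.List.enumerate, ih]

-- first-maximum under a monotone value cast Nat → Int is unchanged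
lemma max?_natCast {α : Type} (xs : List α) (f : α → Nat) :
    PySem.List.max? xs (fun a => ((f a : Nat) : Int)) = PySem.List.max? xs f := by
  unfold PySem.List.max?
  have h : ∀ (t : List α) (acc : Option α),
      List.foldl (fun acc x => match acc with
        | none => some x
        | some m => if ((f m : Int) < (f x : Int)) then some x else some m) acc t =
      List.foldl (fun acc x => match acc with
        | none => some x
        | some m => if f m < f x then some x else some m) acc t := by
    intro t
    induction t with
    | nil => intro acc; rfl
    | cons b u ihu =>
      intro acc
      simp only [List.foldl_cons]
      rw [ihu]
      congr 1
      cases acc with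
      | none => rfl
      | some m => simp
  exact h xs none

-- the loop body, as a function equation (for rewriting under foldl)
lemma stepA_funext :
    (fun (d : PySem.Dict String (List (Int × List String))) (p : Int × List String) =>
       let key := p.2.headD ""
       let d1 := if d.contains key then d else d.insert key []
       d1.insert key (d1.getD key [] ++ [(p.1, p.2.drop 1)]))
    = fun d p => d.modify (p.2.headD "") [] (· ++ [(p.1, p.2.drop 1)]) := by
  funext d p
  exact stepA_eq_modify d (p.2.headD "") (p.1, p.2.drop 1)

lemma enum_map_key (rules : List (List String)) :
    (PySem.List.enumerate rules).map (fun p => p.2.headD "")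
      = rules.map (fun r => r.headD "") := by
  conv_rhs => rw [← enum_map_snd rules 0]
  rw [List.map_map]
  rfl

-- the characterisation of A's dict: values and keys
lemma factorsA_getD (rules : List (List String)) (c : String) :
    ((PySem.List.enumerate rules).foldl
      (fun d p =>
        let key := p.2.headD ""
        let d1 := if d.contains key then d else d.insert key []
        d1.insert key (d1.getD key [] ++ [(p.1, p.2.drop 1)]))
      (PySem.Dict.empty : PySem.Dict String (List (Int × List String)))).getD c []
    = ((PySem.List.enumerate rules).filter (fun p => p.2.headD "" == c)).map
        (fun p => (p.1, p.2.drop 1)) := by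
  rw [stepA_funext,
      ← List.foldl_map (f := fun p : Int × List String => (p.2.headD "", (p.1, p.2.drop 1)))
        (g := fun (d : PySem.Dict String (List (Int × List String))) q =>
          d.modify q.1 [] (· ++ [q.2])),
      PySem.Dict.getD_foldl_modify_append]
  simp [List.filter_map, Function.comp_def]

lemma factorsA_keys (rules : List (List String)) :
    ((PySem.List.enumerate rules).foldl
      (fun d p =>
        let key := p.2.headD ""
        let d1 := if d.contains key then d else d.insert key []
        d1.insert key (d1.getD key [] ++ [(p.1, p.2.drop 1)]))
      (PySem.Dict.empty : PySem.Dict String (List (Int × List String)))).keys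
    = PySem.Set.ofList (rules.map (fun r => r.headD "")) := by
  rw [stepA_funext,
      PySem.Dict.keys_foldl_modify_key (key := fun p : Int × List String => p.2.headD ""),
      enum_map_key]
  simp [PySem.Set.update, PySem.Set.ofList_eq_foldl, PySem.Dict.keys_empty]

lemma countsB_getD (rules : List (List String)) (c : String) :
    (rules.foldl (fun d r => d.insert (r.headD "") (d.getD (r.headD "") 0 + 1))
      (PySem.Dict.empty : PySem.Dict String Int)).getD c 0
    = ((rules.map (fun r => r.headD "")).count c : Int) := by
  rw [← List.foldl_map (f := fun r : List String => r.headD "")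
      (g := fun (d : PySem.Dict String Int) x => d.insert x (d.getD x 0 + 1)),
      PySem.Dict.getD_foldl_insert_add_one]
  simp

lemma countsB_keys (rules : List (List String)) :
    (rules.foldl (fun d r => d.insert (r.headD "") (d.getD (r.headD "") 0 + 1))
      (PySem.Dict.empty : PySem.Dict String Int)).keys
    = PySem.Set.ofList (rules.map (fun r => r.headD "")) := by
  have h := PySem.Dict.keys_foldl_insert_key rules (fun r => r.headD "")
    (fun d r => d.getD (r.headD "") 0 + 1) (PySem.Dict.empty : PySem.Dict String Int)
  simp only [] at h
  rw [h]
  simp [PySem.Set.update, PySem.Set.ofList_eq_foldl, PySem.Dict.keys_empty]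

lemma lenA_eq_count (rules : List (List String)) (c : String) :
    (((PySem.List.enumerate rules).filter (fun p => p.2.headD "" == c)).map
        (fun p => (p.1, p.2.drop 1))).length
    = (rules.map (fun r => r.headD "")).count c := by
  rw [List.length_map, ← List.countP_eq_length_filter, List.count_eq_countP]
  have h := enum_map_snd rules 0
  calc (PySem.List.enumerate rules).countP (fun p => p.2.headD "" == c)
      = ((PySem.List.enumerate rules).map (·.2)).countP (fun r => r.headD "" == c) := by
        rw [List.countP_map]; rfl
    _ = rules.countP (fun r => r.headD "" == c) := by rw [h]
    _ = (rules.map (fun r => r.headD "")).countP (fun x => x == c) := by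
        rw [List.countP_map]; rfl

-- ===== VERDICT (by name: the statement is the Claim_ definition above) =====
theorem getNextFactors_spec : Claim_equal_getNextFactors := by
  intro rules _ _
  unfold Spec_getNextFactors getNextFactors getNextFactors_alt
  simp only [factorsA_keys, countsB_keys, factorsA_getD, countsB_getD]
  have hkey : (fun k => ((((PySem.List.enumerate rules).filter (fun p => p.2.headD "" == k)).map
        (fun p => (p.1, p.2.drop 1))).length : Nat))
      = fun k => (rules.map (fun r => r.headD "")).count k := by
    funext k; exact lenA_eq_count rules k
  rw [hkey]
  have hmax : PySem.List.max? (PySem.Set.ofList (rules.map (fun r => r.headD "")))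
        (fun k => (((rules.map (fun r => r.headD "")).count k : Nat) : Int))
      = PySem.List.max? (PySem.Set.ofList (rules.map (fun r => r.headD "")))
        (fun k => (rules.map (fun r => r.headD "")).count k) :=
    max?_natCast _ _
  rw [hmax]
  cases hm : PySem.List.max? (PySem.Set.ofList (rules.map (fun r => r.headD "")))
      (fun k => (rules.map (fun r => r.headD "")).count k) with
  | none => rfl
  | some best =>
    simp only []
    rw [lenA_eq_count]
    have hfold := PySem.List.foldl_append_if
      (fun p : Int × List String => p.2.headD "" == best)
      (fun p : Int × List String => (p.1, p.2.drop 1)) (PySem.List.enumerate rules) []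
    rw [hfold]
    simp
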